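-- pv_equiv track=rewrite | github.com/dmlcksghd/coding_practice | L2_멀리뛰기.py | solution
-- ===== SOURCE A (Python) =====
-- def solution(n):
--     if n == 1:
--         return 1
--     elif n == 2:
--         return 2
--
--     # 피보나치 계산을 위한 초기 값
--     prev1 = 1
--     prev2 = 2
--
--     for i in range(3, n + 1):
--         curr = (prev1 + prev2) % 1234567
--         prev1 = prev2
--         prev2 = curr
--
--     return prev2
-- ===== SOURCE B (Python) =====
-- def solution(n):
--     if n == 1:
--         return 1
--     if n <= 2:
--         return 2
--
--     def fib_pair(k):
--         # (fib(k) % 1234567, fib(k+1) % 1234567) with fib(0)=0, fib(1)=1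
--         if k == 0:
--             return (0, 1)
--         a, b = fib_pair(k >> 1)
--         c = a * (2 * b - a) % 1234567
--         d = (a * a + b * b) % 1234567
--         if k & 1:
--             return (d, (c + d) % 1234567)
--         return (c, d)
--
--     return fib_pair(n + 1)[0]
-- ===== Notes on version B (the rewrite author's own statement) =====
-- stated objective: faster
-- what changed: Replaced the O(n) iterative Fibonacci loop with recursive fast doubling on (fib(k), fib(k+1)) pairs mod 1234567.
import Mathlib
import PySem

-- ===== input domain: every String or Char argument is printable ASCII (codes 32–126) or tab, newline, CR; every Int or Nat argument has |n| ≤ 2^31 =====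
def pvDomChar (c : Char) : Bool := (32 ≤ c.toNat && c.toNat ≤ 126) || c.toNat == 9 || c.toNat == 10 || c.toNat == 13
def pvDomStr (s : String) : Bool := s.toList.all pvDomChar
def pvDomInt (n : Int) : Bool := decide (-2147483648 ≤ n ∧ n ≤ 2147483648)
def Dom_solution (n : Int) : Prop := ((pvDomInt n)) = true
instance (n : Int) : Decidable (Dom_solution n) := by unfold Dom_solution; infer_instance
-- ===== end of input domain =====

-- B replaces A's linear loop by Fibonacci fast doubling mod 1234567; same return value for every n.

-- ===== PORT A =====
-- literal transliteration: the for-loop over range(3, n+1) as a foldl over pyRange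
def solution (n : Int) : Int :=
  if n = 1 then 1
  else if n = 2 then 2
  else
    let st := (PySem.List.pyRange 3 (n + 1) 1).foldl
      (fun (p : Int × Int) (_ : Int) => (p.2, PySem.Int.mod (p.1 + p.2) 1234567)) (1, 2)
    st.2

-- ===== PORT B =====
-- fib_pair from Source B; B only calls it with k = n + 1 ≥ 4, so the Nat recursion
-- (k >> 1 = k / 2, k & 1 = k % 2) is exact there
def fibPairB : Nat → Int × Int
  | 0 => (0, 1)
  | (k + 1) =>
    let p := fibPairB ((k + 1) / 2)
    let a := p.1
    let b := p.2
    let c := PySem.Int.mod (a * (2 * b - a)) 1234567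
    let d := PySem.Int.mod (a * a + b * b) 1234567
    if (k + 1) % 2 = 1 then (d, PySem.Int.mod (c + d) 1234567) else (c, d)

def solution_alt (n : Int) : Int :=
  if n = 1 then 1
  else if n ≤ 2 then 2
  else (fibPairB (n + 1).toNat).1

-- ===== PRECONDITION & SPEC =====
def Spec_solution (n : Int) (out : Int) : Prop := out = solution_alt n
instance (n : Int) (out : Int) : Decidable (Spec_solution n out) := by unfold Spec_solution; infer_instance

-- ===== CLAIM (what is proved, stated in full; the proofs are below) =====
def Claim_equal_solution : Prop := ∀ (n : Int), Dom_solution n → Spec_solution n (solution n)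

-- ===== LEMMAS AND PROOFS =====

theorem pymod_eq (a : Int) : PySem.Int.mod a 1234567 = a % 1234567 :=
  PySem.Int.mod_eq_emod_of_pos (by norm_num)

-- a % M is congruent to a mod M
theorem emod_modeq (a : Int) : (a % 1234567) ≡ a [ZMOD 1234567] :=
  Int.emod_emod_of_dvd a dvd_rfl

-- fast doubling computes Fibonacci pairs mod 1234567
theorem fibPairB_eq (k : Nat) :
    fibPairB k = ((Nat.fib k : Int) % 1234567, (Nat.fib (k + 1) : Int) % 1234567) := by
  induction k using Nat.strong_induction_on with
  | _ k IH =>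
    match k with
    | 0 => simp [fibPairB, Nat.fib]
    | (j + 1) =>
      have ih1 := IH ((j + 1) / 2) (by omega)
      rw [fibPairB]
      set m : Nat := (j + 1) / 2 with hm
      simp only [ih1]
      have hle : Nat.fib m ≤ 2 * Nat.fib (m + 1) :=
        le_trans (Nat.fib_le_fib_succ) (by omega)
      have hc2 : ((Nat.fib (2 * m) : Int)) =
          (Nat.fib m : Int) * (2 * (Nat.fib (m + 1) : Int) - (Nat.fib m : Int)) := by
        rw [Nat.fib_two_mul]
        push_cast [Nat.cast_sub hle]
        ring
      have hd2 : ((Nat.fib (2 * m + 1) : Int)) =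
          (Nat.fib m : Int) * (Nat.fib m : Int) + (Nat.fib (m + 1) : Int) * (Nat.fib (m + 1) : Int) := by
        rw [Nat.fib_two_mul_add_one]
        push_cast
        ring
      have hc : PySem.Int.mod (((Nat.fib m : Int) % 1234567) *
            (2 * ((Nat.fib (m + 1) : Int) % 1234567) - (Nat.fib m : Int) % 1234567)) 1234567
          = (Nat.fib (2 * m) : Int) % 1234567 := by
        rw [pymod_eq, hc2]
        exact (((emod_modeq _).mul (((Int.ModEq.refl 2).mul (emod_modeq _)).sub (emod_modeq _))))
      have hd : PySem.Int.mod (((Nat.fib m : Int) % 1234567) * ((Nat.fib m : Int) % 1234567) +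
            ((Nat.fib (m + 1) : Int) % 1234567) * ((Nat.fib (m + 1) : Int) % 1234567)) 1234567
          = (Nat.fib (2 * m + 1) : Int) % 1234567 := by
        rw [pymod_eq, hd2]
        exact ((emod_modeq _).mul (emod_modeq _)).add ((emod_modeq _).mul (emod_modeq _))
      by_cases hpar : (j + 1) % 2 = 1
      · have h2m : j + 1 = 2 * m + 1 := by omega
        rw [if_pos hpar, hc, hd, h2m]
        refine Prod.ext rfl ?_
        simp only
        have hsum : (Nat.fib (2 * m + 1 + 1) : Int)
            = (Nat.fib (2 * m) : Int) + (Nat.fib (2 * m + 1) : Int) := by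
          rw [Nat.fib_add_two]; push_cast; ring
        rw [pymod_eq, hsum]
        exact (emod_modeq _).add (emod_modeq _)
      · have h2m : j + 1 = 2 * m := by omega
        rw [if_neg hpar, hc, hd, h2m]

-- A's loop invariant: after processing range(3, m+3), the state is (fib(m+2), fib(m+3)) mod 1234567
theorem loopA (m : Nat) :
    (PySem.List.pyRange 3 ((m : Int) + 3) 1).foldl
      (fun (p : Int × Int) (_ : Int) => (p.2, PySem.Int.mod (p.1 + p.2) 1234567)) (1, 2)
    = ((Nat.fib (m + 2) : Int) % 1234567, (Nat.fib (m + 3) : Int) % 1234567) := by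
  induction m with
  | zero =>
    rw [show ((0 : Nat) : Int) + 3 = 3 by norm_num,
        PySem.List.pyRange_one_eq_nil le_rfl]
    simp [Nat.fib]
  | succ m ih =>
    have hstep : ((m + 1 : Nat) : Int) + 3 = ((m : Int) + 3) + 1 := by push_cast; ring
    rw [hstep, PySem.List.pyRange_one_succ_right (by omega), List.foldl_append, ih]
    simp only [List.foldl_cons, List.foldl_nil]
    refine Prod.ext rfl ?_
    simp only
    rw [pymod_eq]
    have hsum : (Nat.fib (m + 1 + 3) : Int) = (Nat.fib (m + 2) : Int) + (Nat.fib (m + 3) : Int) := by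
      rw [show m + 1 + 3 = (m + 2) + 2 by ring, Nat.fib_add_two]; push_cast; ring
    rw [hsum]
    exact (emod_modeq _).add (emod_modeq _)

-- ===== VERDICT (by name: the statement is the Claim_ definition above) =====
theorem solution_spec : Claim_equal_solution := by
  intro n _
  unfold Spec_solution solution solution_alt
  by_cases h1 : n = 1
  · simp [h1]
  · by_cases h2 : n = 2
    · simp [h2]
    · by_cases h3 : n ≤ 2
      · rw [if_neg h1, if_neg h2, if_neg h1, if_pos h3,
            PySem.List.pyRange_one_eq_nil (by omega : n + 1 ≤ 3)]
        simp
      · obtain ⟨m, rfl⟩ : ∃ m : Nat, n = (m : Int) + 3 := ⟨(n - 3).toNat, by omega⟩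
        rw [if_neg h1, if_neg h2, if_neg h1, if_neg h3]
        have h4 : ((m : Int) + 3) + 1 = ((m + 1 : Nat) : Int) + 3 := by push_cast; ring
        rw [h4, loopA (m + 1)]
        have h5 : (((m + 1 : Nat) : Int) + 3).toNat = m + 4 := by omega
        rw [h5, fibPairB_eq (m + 4)]
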